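-- pv_equiv track=rewrite | github.com/Akua-Serwaa-Nkrumah/CompetitiveProgramming-master | CompetitiveProgramming-master/Camp/ProgressSheet/MagicBeans.py | minimumRemoval
-- ===== SOURCE A (Python) =====
-- def minimumRemoval(beans: [int]) -> int:
--     beans.sort()
--     p_sum = [beans[0]]*len(beans)
--
--     for i in range(1,len(beans)):
--         p_sum[i] = p_sum[i-1] + beans[i]
--
--     res = (p_sum[-1]-p_sum[0]) - beans[0]*(len(beans)-1)
--     for i in range(1,len(beans)):
--         res = min(res,(p_sum[-1]-p_sum[i]) - beans[i]*(len(beans)-1-i) + p_sum[i-1])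
--
--     return res
-- ===== SOURCE B (Python) =====
-- def minimumRemoval(beans: [int]) -> int:
--     # Frequency-count approach: no sort of the beans themselves and no prefix-sum
--     # array (B does not mutate beans, unlike A which sorts it in place; the
--     # equivalence claimed is about the return value).  Keeping value v keeps v*k
--     # beans where k, the number of piles left standing, ranges over
--     # [count(>v)+1, count(>=v)]; v*k is linear in k, so it is maximal at an
--     # endpoint.  Maximize the kept amount over the distinct values, tracked with
--     # a running count of beans below the current value.
--     cnt = {}
--     for b in beans:
--         cnt[b] = cnt.get(b, 0) + 1
--     n = len(beans)
--     total = sum(beans)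
--     best = None
--     lt = 0  # number of beans strictly below the current value
--     for v in sorted(cnt):
--         ge = n - lt
--         keep = max(v * ge, v * (ge - cnt[v] + 1))
--         lt += cnt[v]
--         if best is None or keep > best:
--             best = keep
--     return total - best
-- ===== Notes on version B (the rewrite author's own statement) =====
-- stated objective: alternative
-- what changed: Instead of sorting the beans and minimizing removal cost per position with a prefix-sum array, B builds a frequency dictionary, iterates over the sorted DISTINCT values with a running count of beans below the current value, and maximizes the kept amount v*k (k at an endpoint of [count(>v)+1, count(>=v)]), returning total - best.
import Mathlib
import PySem

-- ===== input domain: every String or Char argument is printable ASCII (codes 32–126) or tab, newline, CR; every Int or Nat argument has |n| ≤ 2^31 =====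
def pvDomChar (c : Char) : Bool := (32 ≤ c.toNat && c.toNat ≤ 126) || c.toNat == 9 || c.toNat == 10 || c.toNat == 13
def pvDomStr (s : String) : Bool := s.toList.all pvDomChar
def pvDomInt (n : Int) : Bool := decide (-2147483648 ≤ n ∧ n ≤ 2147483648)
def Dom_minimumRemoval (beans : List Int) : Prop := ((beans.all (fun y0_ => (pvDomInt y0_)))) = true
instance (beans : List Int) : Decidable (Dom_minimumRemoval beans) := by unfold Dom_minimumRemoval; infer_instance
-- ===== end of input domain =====

-- B replaces A's sort + prefix-sum positional scan by a frequency dictionary and a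
-- scan over the sorted DISTINCT values with a running count, maximizing the kept
-- amount (alternative decomposition; A sorts its argument in place, B does not
-- mutate it: the equivalence proved is about the return value).


-- ===== PORT A =====
def minimumRemoval (beans : List Int) : Int :=
  let s := PySem.List.sorted beans (fun x => x) false
  let n : Int := s.length
  let b0 := PySem.List.pyGetD s 0 0
  let psum := (PySem.List.pyRange 1 n 1).foldl
      (fun p i => PySem.List.pySetD p i (PySem.List.pyGetD p (i-1) 0 + PySem.List.pyGetD s i 0))
      (List.replicate s.length b0)
  let res := (PySem.List.pyGetD psum (-1) 0 - PySem.List.pyGetD psum 0 0) - b0 * (n - 1)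
  (PySem.List.pyRange 1 n 1).foldl
      (fun r i => min r ((PySem.List.pyGetD psum (-1) 0 - PySem.List.pyGetD psum i 0)
                          - PySem.List.pyGetD s i 0 * (n - 1 - i) + PySem.List.pyGetD psum (i-1) 0))
      res

-- ===== PORT B =====
-- cnt[v] is ported as getD v 0; the loop only visits keys of cnt, so no KeyError can arise.
def minimumRemoval_alt (beans : List Int) : Int :=
  let cnt := beans.foldl (fun d b => d.insert b (d.getD b 0 + 1)) PySem.Dict.empty
  let n : Int := beans.length
  let total := beans.sum
  let r := (PySem.List.sorted cnt.keys (fun x => x) false).foldl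
    (fun (s : Option Int × Int) v =>
      let ge := n - s.2
      let keep := max (v * ge) (v * (ge - cnt.getD v 0 + 1))
      let lt := s.2 + cnt.getD v 0
      let best := match s.1 with
        | none => some keep
        | some b => if keep > b then some keep else some b
      (best, lt))
    (none, 0)
  match r.1 with
  | none => 0  -- Python: total - None raises TypeError there; the empty list is outside Pre_
  | some b => total - b

-- ===== PRECONDITION & SPEC =====
-- Pre_ excludes only the empty list, on which A raises IndexError (beans[0]) and B raises TypeError.
def Pre_minimumRemoval (beans : List Int) : Prop := beans ≠ []
instance (beans : List Int) : Decidable (Pre_minimumRemoval beans) := by unfold Pre_minimumRemoval; infer_instance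
def pvWitness_minimumRemoval : List Int := ([3, 1, 2] : List Int)
def Spec_minimumRemoval (beans : List Int) (out : Int) : Prop := out = minimumRemoval_alt beans
instance (beans : List Int) (out : Int) : Decidable (Spec_minimumRemoval beans out) := by unfold Spec_minimumRemoval; infer_instance

-- ===== CLAIM (what is proved, stated in full; the proofs are below) =====
def Claim_equal_minimumRemoval : Prop := ∀ (beans : List Int), Dom_minimumRemoval beans → Pre_minimumRemoval beans → Spec_minimumRemoval beans (minimumRemoval beans)

-- ===== LEMMAS AND PROOFS =====

-- ---- A-side machinery: the prefix-sum fold, the range loop, min/max duality ----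
def pvT (s : List Int) (k : Nat) : Int := (s.take (k+1)).sum

theorem pvT_succ (s : List Int) (k : Nat) (hk : k + 1 < s.length) :
    pvT s (k+1) = pvT s k + s.getD (k+1) 0 := by
  unfold pvT
  rw [List.take_add_one, List.sum_append]
  simp [List.getD, List.getElem?_eq_getElem hk]

theorem pvT_zero (s : List Int) : pvT s 0 = s.getD 0 0 := by
  cases s <;> simp [pvT]

theorem psum_fold_spec (s : List Int) (m : Nat) (hm : m ≤ s.length) :
    (PySem.List.pyRange 1 (m : Int) 1).foldl
      (fun p i => PySem.List.pySetD p i (PySem.List.pyGetD p (i-1) 0 + PySem.List.pyGetD s i 0))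
      (List.replicate s.length (PySem.List.pyGetD s 0 0))
    = (List.range s.length).map (fun k => if k < m then pvT s k else PySem.List.pyGetD s 0 0) := by
  induction m with
  | zero =>
    rw [PySem.List.pyRange_one_eq_nil (by norm_num)]
    simp [List.map_const']
  | succ j ih =>
    rcases Nat.eq_zero_or_pos j with hj | hj
    · subst hj
      rw [show ((1:Nat) : Int) = 1 by norm_num, PySem.List.pyRange_one_eq_nil (by norm_num)]
      simp only [List.foldl_nil]
      have hc : ∀ k ∈ List.range s.length,
          (if k < 1 then pvT s k else PySem.List.pyGetD s 0 0) = PySem.List.pyGetD s 0 0 := by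
        intro k hk
        split_ifs with h
        · interval_cases k
          rw [pvT_zero, PySem.List.pyGetD_zero]
        · rfl
      rw [List.map_congr_left hc, List.map_const', List.length_range]
    · have h1 : ((j+1 : Nat) : Int) = (j : Int) + 1 := by push_cast; ring
      rw [h1, PySem.List.pyRange_one_succ_right (by exact_mod_cast hj), List.foldl_append,
          ih (by omega), List.foldl_cons, List.foldl_nil]
      have hjlen : j < s.length := by omega
      have hj1len : j + 1 ≤ s.length := by omega
      have e1 : ((j:Int) - 1) = ((j-1 : Nat) : Int) := by push_cast [hj]; ring
      rw [e1, PySem.List.pyGetD_natCast, PySem.List.pyGetD_natCast, PySem.List.pySetD_natCast,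
          PySem.List.getD_map_range _ _ _ _ (by omega)]
      have hcond : j - 1 < j := by omega
      rw [if_pos hcond]
      have hval : pvT s (j-1) + s.getD j 0 = pvT s j := by
        have := pvT_succ s (j-1) (by omega)
        rw [show j - 1 + 1 = j by omega] at this
        omega
      rw [hval]
      apply List.ext_getElem (by simp)
      intro i hi1 hi2
      simp only [List.getElem_set, List.getElem_map, List.getElem_range]
      simp only [List.length_map, List.length_range] at hi2
      split_ifs with h1 h2 h3 h4 h5 <;> try (first | rfl | omega)
      · subst h1; rfl

-- position k of the sorted list keeps its value times the piles from k on
def faL (L : List Int) (k : Nat) : Int := L.getD k 0 * ((L.length : Int) - (k : Int))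

-- the running maximum A's minimisation is dual to
def MA (L : List Int) : Int :=
  ((List.range (L.length - 1)).map (fun j => faL L (j+1))).foldl max (faL L 0)

-- min over (t - f x) is t - max over f x
theorem foldl_min_map_sub {α : Type} (l : List α) (t : Int) (f : α → Int) (a : Int) :
    (l.map (fun x => t - f x)).foldl min (t - a) = t - (l.map f).foldl max a := by
  induction l generalizing a with
  | nil => rfl
  | cons x xs ih =>
    simp only [List.map_cons, List.foldl_cons]
    rw [show min (t - a) (t - f x) = t - max a (f x) by
      rcases le_total a (f x) with h | h
      · rw [max_eq_right h, min_eq_right (by omega)]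
      · rw [max_eq_left h, min_eq_left (by omega)]]
    exact ih (max a (f x))

theorem A_char_aux (s : List Int) (hsne : s ≠ []) :
    (let n : Int := s.length
     let b0 := PySem.List.pyGetD s 0 0
     let psum := (PySem.List.pyRange 1 n 1).foldl
        (fun p i => PySem.List.pySetD p i (PySem.List.pyGetD p (i-1) 0 + PySem.List.pyGetD s i 0))
        (List.replicate s.length b0)
     let res := (PySem.List.pyGetD psum (-1) 0 - PySem.List.pyGetD psum 0 0) - b0 * (n - 1)
     (PySem.List.pyRange 1 n 1).foldl
        (fun r i => min r ((PySem.List.pyGetD psum (-1) 0 - PySem.List.pyGetD psum i 0)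
                            - PySem.List.pyGetD s i 0 * (n - 1 - i) + PySem.List.pyGetD psum (i-1) 0))
        res)
    = s.sum - MA s := by
  obtain ⟨n', hn'⟩ : ∃ n', s.length = n' + 1 :=
    ⟨s.length - 1, by cases s <;> simp_all⟩
  have hlen1 : 1 ≤ s.length := by omega
  simp only
  rw [psum_fold_spec s s.length le_rfl]
  have hpsum : (List.range s.length).map
        (fun k => if k < s.length then pvT s k else PySem.List.pyGetD s 0 0)
      = (List.range s.length).map (pvT s) :=
    List.map_congr_left (by intro k hk; rw [if_pos (List.mem_range.mp hk)])
  rw [hpsum]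
  have hlast : PySem.List.pyGetD ((List.range s.length).map (pvT s)) (-1) 0 = s.sum := by
    rw [PySem.List.pyGetD_neg_ofNat _ 1 0 (by omega) (by simp; omega)]
    simp only [List.length_map, List.length_range, List.getElem_map, List.getElem_range]
    unfold pvT
    rw [show s.length - 1 + 1 = s.length by omega, List.take_length]
  have h0 : PySem.List.pyGetD ((List.range s.length).map (pvT s)) 0 0 = s.getD 0 0 := by
    rw [PySem.List.pyGetD_zero, PySem.List.getD_map_range _ _ _ _ (by omega), pvT_zero]
  rw [hlast, h0, PySem.List.pyGetD_zero]
  -- turn the RHS into a min-fold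
  have hMA : s.sum - MA s
      = ((List.range n').map (fun j => s.sum - faL s (j+1))).foldl min (s.sum - faL s 0) := by
    rw [foldl_min_map_sub (List.range n') s.sum (fun j => faL s (j+1)) (faL s 0)]
    unfold MA
    rw [hn']
    simp
  rw [hMA, List.foldl_map]
  -- turn the LHS range into List.range n'
  rw [PySem.List.pyRange_one, show (((s.length : Int)) - 1).toNat = n' by omega, List.foldl_map]
  have hinit : s.sum - s.getD 0 0 - s.getD 0 0 * ((s.length : Int) - 1)
      = s.sum - faL s 0 := by
    unfold faL
    push_cast
    ring
  rw [hinit]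
  apply PySem.List.foldl_congr_mem
  intro acc j hj
  have hj' : j < n' := List.mem_range.mp hj
  congr 1
  have e1 : (1 : Int) + (j : Int) = ((j+1 : Nat) : Int) := by push_cast; ring
  rw [e1, show ((j+1 : Nat) : Int) - 1 = ((j : Nat) : Int) by push_cast; ring]
  rw [PySem.List.pyGetD_natCast, PySem.List.pyGetD_natCast, PySem.List.pyGetD_natCast,
      PySem.List.getD_map_range _ _ _ _ (by omega), PySem.List.getD_map_range _ _ _ _ (by omega)]
  rw [pvT_succ s j (by omega)]
  unfold faL
  push_cast
  ring

theorem A_char (beans : List Int) (h : beans ≠ []) :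
    minimumRemoval beans
      = (PySem.List.sorted beans (fun x => x) false).sum
        - MA (PySem.List.sorted beans (fun x => x) false) := by
  exact A_char_aux _ (by rw [ne_eq, PySem.List.sorted_eq_nil_iff]; exact h)

theorem faL_le_MA (L : List Int) (k : Nat) (hk : k < L.length) : faL L k ≤ MA L := by
  cases k with
  | zero => exact (PySem.List.le_foldl_max _ _).1
  | succ j =>
    apply (PySem.List.le_foldl_max _ _).2
    exact List.mem_map.mpr ⟨j, List.mem_range.mpr (by omega), rfl⟩

theorem MA_mem (L : List Int) (h : L ≠ []) : ∃ k, k < L.length ∧ MA L = faL L k := by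
  have hpos : 0 < L.length := List.length_pos_iff.mpr h
  rcases PySem.List.foldl_max_mem ((List.range (L.length - 1)).map (fun j => faL L (j+1))) (faL L 0) with hm | hm
  · exact ⟨0, hpos, hm⟩
  · rcases List.mem_map.mp hm with ⟨j, hj, hje⟩
    exact ⟨j + 1, by have := List.mem_range.mp hj; omega, hje.symm⟩

-- ---- counting lemmas ----
theorem cnt_split (l : List Int) (v : Int) :
    l.countP (fun u => decide (v ≤ u)) = l.countP (fun u => decide (v < u)) + l.count v := by
  induction l with
  | nil => simp
  | cons a t ih =>
    simp only [List.countP_cons, List.count_cons, ih]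
    rcases lt_trichotomy v a with h | h | h
    · simp [h, le_of_lt h, ne_of_gt h]; omega
    · simp [h]; omega
    · simp [not_le.mpr h, not_lt.mpr (le_of_lt h), ne_of_lt h]

theorem cnt_total (l : List Int) (v : Int) :
    l.countP (fun u => decide (v ≤ u)) + l.countP (fun u => decide (u < v)) = l.length := by
  induction l with
  | nil => simp
  | cons a t ih =>
    simp only [List.countP_cons, List.length_cons]
    by_cases h : v ≤ a
    · simp [h, not_lt.mpr h]; omega
    · simp [h, not_le.mp h]; omega

theorem countP_or_disj (l : List Int) (p q : Int → Bool) (h : ∀ u, ¬(p u = true ∧ q u = true)) :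
    l.countP (fun u => p u || q u) = l.countP p + l.countP q := by
  induction l with
  | nil => simp
  | cons x t ih =>
    simp only [List.countP_cons, ih]
    by_cases hp : p x = true
    · have hq : ¬ q x = true := fun hq => h x ⟨hp, hq⟩
      simp [hp, hq]
      omega
    · by_cases hq : q x = true <;> simp [hp, hq] <;> omega

theorem countP_mem_cons (l : List Int) (a : Int) (P : List Int) (ha : a ∉ P) :
    l.countP (fun u => decide (u ∈ a :: P)) = l.count a + l.countP (fun u => decide (u ∈ P)) := by
  have h1 : l.countP (fun u => decide (u ∈ a :: P))
      = l.countP (fun u => decide (u = a) || decide (u ∈ P)) := by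
    apply List.countP_congr
    intro x _
    simp [List.mem_cons]
  rw [h1, countP_or_disj _ _ _ (fun u hu => ha (by rcases hu with ⟨h2, h3⟩; simp at h2 h3; exact h2 ▸ h3))]
  congr 1

theorem sum_counts_nodup (l : List Int) (P : List Int) (hnd : P.Nodup) :
    (P.map (fun u => l.count u)).sum = l.countP (fun u => decide (u ∈ P)) := by
  induction P with
  | nil => simp
  | cons a P' ih =>
    rw [List.nodup_cons] at hnd
    simp only [List.map_cons, List.sum_cons, ih hnd.2, countP_mem_cons l a P' hnd.1]

-- in a sorted list a monotone predicate holds exactly on the suffix of its count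
theorem sorted_pred_iff (L : List Int) (hs : L.Pairwise (· ≤ ·)) (p : Int → Bool)
    (hp : ∀ x y : Int, x ≤ y → p x = true → p y = true) :
    ∀ j, j < L.length → (p (L.getD j 0) = true ↔ L.length - L.countP p ≤ j) := by
  induction hs with
  | nil => intro j hj; simp at hj
  | @cons a t ha ht ih =>
    intro j hj
    by_cases hpa : p a = true
    · have hall : ∀ x ∈ t, p x = true := fun x hx => hp a x (ha x hx) hpa
      have hcnt : (a :: t).countP p = (a :: t).length := by
        rw [List.countP_eq_length]
        intro x hx
        rcases List.mem_cons.mp hx with h | h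
        · exact h ▸ hpa
        · exact hall x h
      rw [hcnt]
      simp only [Nat.sub_self, Nat.zero_le, iff_true]
      cases j with
      | zero => simpa using hpa
      | succ j' =>
        rw [List.getD_cons_succ]
        have hj' : j' < t.length := by simpa using hj
        rw [List.getD_eq_getElem t 0 hj']
        exact hall _ (List.getElem_mem hj')
    · have hcnt : (a :: t).countP p = t.countP p := by
        simp [hpa]
      have hle : t.countP p ≤ t.length := List.countP_le_length
      rw [hcnt]
      cases j with
      | zero =>
        simp only [List.getD_cons_zero, List.length_cons]
        constructor
        · intro h; exact absurd h hpa
        · intro h; omega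
      | succ j' =>
        rw [List.getD_cons_succ, List.length_cons]
        have hj' : j' < t.length := by simpa using hj
        rw [ih j' hj']
        omega

-- ---- B-side machinery ----
def cntZ (beans : List Int) (v : Int) : Int := (beans.count v : Int)

def keepf (beans : List Int) (v lt : Int) : Int :=
  max (v * ((beans.length : Int) - lt))
      (v * ((beans.length : Int) - lt - cntZ beans v + 1))

def runMax (beans : List Int) (l : List Int) (lt b : Int) : Int :=
  match l with
  | [] => b
  | v :: vs => runMax beans vs (lt + cntZ beans v) (max b (keepf beans v lt))

-- the per-value kept maximum, endpoints count(>=v) and count(>v)+1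
def gB (beans : List Int) (v : Int) : Int :=
  max (v * ((beans.countP (fun u => decide (v ≤ u)) : Int)))
      (v * ((beans.countP (fun u => decide (v < u)) : Int) + 1))

theorem cnt_getD (beans : List Int) (v : Int) :
    (beans.foldl (fun d b => d.insert b (d.getD b 0 + 1)) PySem.Dict.empty).getD v 0
      = cntZ beans v := by
  rw [PySem.Dict.getD_foldl_insert_add_one]
  simp [PySem.Dict.empty, PySem.Dict.getD, PySem.Dict.get?, cntZ]

theorem cnt_keys (beans : List Int) :
    (beans.foldl (fun d b => d.insert b ((d.getD b 0 + 1 : Int))) PySem.Dict.empty).keys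
      = PySem.Set.ofList beans := by
  rw [PySem.Dict.keys_foldl_insert]
  simp [PySem.Dict.empty, PySem.Dict.keys, PySem.Set.update, PySem.Set.ofList_eq_foldl]

theorem fold_some (beans : List Int) :
    ∀ (l : List Int) (b lt : Int),
      (l.foldl (fun (s : Option Int × Int) v =>
        (match s.1 with
          | none => some (keepf beans v s.2)
          | some b => if keepf beans v s.2 > b then some (keepf beans v s.2) else some b,
         s.2 + cntZ beans v)) (some b, lt)).1 = some (runMax beans l lt b) := by
  intro l
  induction l with
  | nil => intro b lt; rfl
  | cons v vs ih =>
    intro b lt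
    rw [List.foldl_cons]
    have hstep : (if keepf beans v lt > b then some (keepf beans v lt) else some b)
        = some (max b (keepf beans v lt)) := by
      rcases le_or_gt (keepf beans v lt) b with h | h
      · rw [if_neg (not_lt.mpr h), max_eq_left h]
      · rw [if_pos h, max_eq_right h.le]
    dsimp only
    rw [hstep, runMax]
    exact ih _ _

theorem B_char (beans : List Int) (d0 : Int) (ds : List Int)
    (hD : PySem.List.sorted (PySem.Set.ofList beans) (fun x => x) false = d0 :: ds) :
    minimumRemoval_alt beans
      = beans.sum - runMax beans (d0 :: ds) 0 (keepf beans d0 0) := by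
  simp only [minimumRemoval_alt, cnt_getD]
  rw [cnt_keys, hD, List.foldl_cons]
  show (match (ds.foldl (fun (s : Option Int × Int) v =>
        (match s.1 with
          | none => some (keepf beans v s.2)
          | some b => if keepf beans v s.2 > b then some (keepf beans v s.2) else some b,
         s.2 + cntZ beans v)) (some (keepf beans d0 0), 0 + cntZ beans d0)).1 with
      | none => (0:Int)
      | some b => beans.sum - b)
    = beans.sum - runMax beans (d0 :: ds) 0 (keepf beans d0 0)
  rw [fold_some]
  show beans.sum - runMax beans ds (0 + cntZ beans d0) (keepf beans d0 0)
    = beans.sum - runMax beans (d0 :: ds) 0 (keepf beans d0 0)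
  rw [runMax, max_self]

theorem runMax_ge_init (beans l : List Int) (lt b : Int) : b ≤ runMax beans l lt b := by
  induction l generalizing lt b with
  | nil => simp [runMax]
  | cons v vs ih => exact le_trans (le_max_left _ _) (ih _ _)

theorem runMax_ge_elem (beans : List Int) (P : List Int) (v : Int) (S : List Int) :
    ∀ (l : List Int) (lt b : Int), l = P ++ v :: S →
      keepf beans v (lt + ((P.map (fun u => cntZ beans u)).sum)) ≤ runMax beans l lt b := by
  induction P with
  | nil =>
    intro l lt b hl
    subst hl
    simp only [List.map_nil, List.sum_nil, add_zero]
    exact le_trans (le_max_right _ _) (runMax_ge_init _ _ _ _)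
  | cons a P' ih =>
    intro l lt b hl
    subst hl
    simp only [List.cons_append, runMax]
    have e : lt + ((List.map (fun u => cntZ beans u) (a :: P')).sum)
        = (lt + cntZ beans a) + ((List.map (fun u => cntZ beans u) P').sum) := by
      simp [add_assoc]
    rw [e]
    exact ih _ _ _ rfl

theorem runMax_cases (beans : List Int) :
    ∀ (l : List Int) (lt b : Int), runMax beans l lt b = b ∨
      ∃ P v S, l = P ++ v :: S ∧
        runMax beans l lt b = keepf beans v (lt + ((P.map (fun u => cntZ beans u)).sum)) := by
  intro l
  induction l with
  | nil => intro lt b; left; rfl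
  | cons v vs ih =>
    intro lt b
    rcases ih (lt + cntZ beans v) (max b (keepf beans v lt)) with h | ⟨P, w, S, hsp, heq⟩
    · rcases max_choice b (keepf beans v lt) with hm | hm
      · left; rw [runMax, h, hm]
      · right
        exact ⟨[], v, vs, rfl, by rw [runMax, h, hm]; simp⟩
    · right
      refine ⟨v :: P, w, S, by rw [List.cons_append, hsp], ?_⟩
      rw [runMax, heq]
      congr 1
      simp [add_assoc]

theorem keepf_eq_gB (beans : List Int) (v : Int) :
    keepf beans v ((beans.countP (fun u => decide (u < v)) : Int)) = gB beans v := by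
  have h1 := cnt_total beans v
  have h2 := cnt_split beans v
  unfold keepf gB cntZ
  congr 1
  · congr 1; omega
  · congr 1; omega

-- a split prefix of the sorted distinct values = the distinct values below v
theorem split_prefix_sum (beans : List Int) (P : List Int) (v : Int) (S : List Int)
    (hD : PySem.List.sorted (PySem.Set.ofList beans) (fun x => x) false = P ++ v :: S) :
    ((P.map (fun u => cntZ beans u)).sum) = ((beans.countP (fun u => decide (u < v)) : Int)) := by
  have hpl := PySem.List.sorted_ofList_pairwise_lt (κ := Int) beans
  rw [hD] at hpl
  rcases List.pairwise_append.mp hpl with ⟨hP, hvs, hcross⟩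
  rcases List.pairwise_cons.mp hvs with ⟨hvlt, _⟩
  have hchar : ∀ u, u ∈ P ↔ (u ∈ beans ∧ u < v) := by
    intro u
    constructor
    · intro hu
      refine ⟨?_, hcross u hu v (List.mem_cons_self)⟩
      have : u ∈ P ++ v :: S := List.mem_append_left _ hu
      rw [← hD] at this
      exact (PySem.Set.mem_ofList _ _).mp ((PySem.List.mem_sorted _ _ _ _).mp this)
    · rintro ⟨hub, hultv⟩
      have : u ∈ P ++ v :: S := by
        rw [← hD]
        exact (PySem.List.mem_sorted _ _ _ _).mpr ((PySem.Set.mem_ofList _ _).mpr hub)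
      rcases List.mem_append.mp this with h | h
      · exact h
      · rcases List.mem_cons.mp h with h | h
        · exact absurd (h ▸ hultv) (lt_irrefl v)
        · exact absurd (hvlt u h) (by omega)
  have hnd : P.Nodup := hP.imp (fun h => ne_of_lt h)
  have hcast : (P.map (fun u => cntZ beans u)).sum
      = (((P.map (fun u => beans.count u)).sum : Nat) : Int) := by
    rw [Nat.cast_list_sum, List.map_map]
    rfl
  rw [hcast, sum_counts_nodup beans P hnd]
  congr 1
  apply List.countP_congr
  intro x hx
  simp [hchar x, hx]

theorem mono_le (v : Int) : ∀ x y : Int, x ≤ y → decide (v ≤ x) = true → decide (v ≤ y) = true := by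
  intro x y h hx; simp_all; omega

theorem mono_lt (v : Int) : ∀ x y : Int, x ≤ y → decide (v < x) = true → decide (v < y) = true := by
  intro x y h hx; simp_all; omega

theorem lin_max (v x lo hi : Int) (hlo : lo ≤ x) (hhi : x ≤ hi) :
    v * x ≤ max (v * hi) (v * lo) := by
  rcases le_or_gt 0 v with h | h
  · exact le_max_of_le_left (mul_le_mul_of_nonneg_left hhi h)
  · exact le_max_of_le_right (mul_le_mul_of_nonpos_left hlo h.le)

theorem faL_le_gB (beans : List Int) (k : Nat)
    (hk : k < (PySem.List.sorted beans (fun x => x) false).length) :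
    faL (PySem.List.sorted beans (fun x => x) false) k
      ≤ gB beans ((PySem.List.sorted beans (fun x => x) false).getD k 0) := by
  set L := PySem.List.sorted beans (fun x => x) false with hL
  have hpair : L.Pairwise (· ≤ ·) := PySem.List.sorted_pairwise beans (fun x => x)
  have hperm : L.Perm beans := PySem.List.sorted_perm beans (fun x => x) false
  set v := L.getD k 0 with hv
  have h1 : L.length - L.countP (fun u => decide (v ≤ u)) ≤ k :=
    (sorted_pred_iff L hpair _ (mono_le v) k hk).mp (by rw [← hv]; simp)
  have h2 : ¬ (L.length - L.countP (fun u => decide (v < u)) ≤ k) := by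
    intro hc
    have := (sorted_pred_iff L hpair _ (mono_lt v) k hk).mpr hc
    rw [← hv] at this
    simp at this
  have hle : L.countP (fun u => decide (v ≤ u)) ≤ L.length := List.countP_le_length
  unfold gB
  rw [← hperm.countP_eq, ← hperm.countP_eq]
  exact lin_max v ((L.length : Int) - (k : Int))
      ((L.countP (fun u => decide (v < u)) : Int) + 1)
      ((L.countP (fun u => decide (v ≤ u)) : Int)) (by omega) (by omega)

theorem gB_le_MA (beans : List Int) (v : Int) (hv : v ∈ beans) :
    gB beans v ≤ MA (PySem.List.sorted beans (fun x => x) false) := by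
  set L := PySem.List.sorted beans (fun x => x) false with hL
  have hpair : L.Pairwise (· ≤ ·) := PySem.List.sorted_pairwise beans (fun x => x)
  have hperm : L.Perm beans := PySem.List.sorted_perm beans (fun x => x) false
  have hvL : v ∈ L := (PySem.List.mem_sorted _ _ _ _).mpr hv
  set ge := L.countP (fun u => decide (v ≤ u)) with hge
  set gt := L.countP (fun u => decide (v < u)) with hgt
  have hgepos : 0 < ge := List.countP_pos_iff.mpr ⟨v, hvL, by simp⟩
  have hcpos : 0 < L.count v := List.count_pos_iff.mpr hvL
  have hsplit : ge = gt + L.count v := cnt_split L v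
  have hgele : ge ≤ L.length := List.countP_le_length
  have hk1 : L.length - ge < L.length := by omega
  have e1 : v ≤ L.getD (L.length - ge) 0 :=
    of_decide_eq_true ((sorted_pred_iff L hpair _ (mono_le v) _ hk1).mpr (by omega))
  have e2 : ¬ (v < L.getD (L.length - ge) 0) := by
    intro hc
    have := (sorted_pred_iff L hpair _ (mono_lt v) _ hk1).mp (decide_eq_true hc)
    omega
  have hval1 : L.getD (L.length - ge) 0 = v := by omega
  have hk2 : L.length - gt - 1 < L.length := by omega
  have e3 : v ≤ L.getD (L.length - gt - 1) 0 :=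
    of_decide_eq_true ((sorted_pred_iff L hpair _ (mono_le v) _ hk2).mpr (by omega))
  have e4 : ¬ (v < L.getD (L.length - gt - 1) 0) := by
    intro hc
    have := (sorted_pred_iff L hpair _ (mono_lt v) _ hk2).mp (decide_eq_true hc)
    omega
  have hval2 : L.getD (L.length - gt - 1) 0 = v := by omega
  have f1 : faL L (L.length - ge) = v * (ge : Int) := by
    unfold faL
    rw [hval1]
    congr 1
    omega
  have f2 : faL L (L.length - gt - 1) = v * ((gt : Int) + 1) := by
    unfold faL
    rw [hval2]
    congr 1
    omega
  unfold gB
  rw [← hperm.countP_eq, ← hperm.countP_eq, ← hge, ← hgt]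
  apply max_le
  · rw [← f1]; exact faL_le_MA L _ hk1
  · rw [← f2]; exact faL_le_MA L _ hk2

theorem gB_le_MB (beans : List Int) (v : Int) (hv : v ∈ beans) (b : Int)
    (d0 : Int) (ds : List Int)
    (hD : PySem.List.sorted (PySem.Set.ofList beans) (fun x => x) false = d0 :: ds) :
    gB beans v ≤ runMax beans (d0 :: ds) 0 b := by
  have hvD : v ∈ d0 :: ds := by
    rw [← hD]
    exact (PySem.List.mem_sorted _ _ _ _).mpr ((PySem.Set.mem_ofList _ _).mpr hv)
  obtain ⟨P, S, hsp⟩ := List.append_of_mem hvD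
  have h1 := runMax_ge_elem beans P v S (d0 :: ds) 0 b hsp
  rw [zero_add, split_prefix_sum beans P v S (hD.trans hsp), keepf_eq_gB] at h1
  exact h1

-- ===== VERDICT (by name: the statement is the Claim_ definition above) =====
theorem minimumRemoval_spec : Claim_equal_minimumRemoval := by
  intro beans _ hpre
  unfold Spec_minimumRemoval
  have hDne : PySem.List.sorted (PySem.Set.ofList beans) (fun x => x) false ≠ [] := by
    rw [ne_eq, PySem.List.sorted_eq_nil_iff]
    intro hnil
    obtain ⟨x, xs, rfl⟩ := List.exists_cons_of_ne_nil hpre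
    have hx := (PySem.Set.mem_ofList (x :: xs) x).mpr List.mem_cons_self
    rw [hnil] at hx
    exact absurd hx (List.not_mem_nil)
  obtain ⟨d0, ds, hD⟩ := List.exists_cons_of_ne_nil hDne
  rw [A_char beans hpre, B_char beans d0 ds hD,
      (PySem.List.sorted_perm beans (fun x => x) false).sum_eq]
  congr 1
  have hLne : PySem.List.sorted beans (fun x => x) false ≠ [] := by
    rw [ne_eq, PySem.List.sorted_eq_nil_iff]
    exact hpre
  apply le_antisymm
  · obtain ⟨k, hk, hMAk⟩ := MA_mem _ hLne
    rw [hMAk]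
    refine le_trans (faL_le_gB beans k hk) ?_
    refine gB_le_MB beans _ ?_ _ d0 ds hD
    have hmem : (PySem.List.sorted beans (fun x => x) false).getD k 0
        ∈ PySem.List.sorted beans (fun x => x) false := by
      rw [List.getD_eq_getElem _ _ hk]
      exact List.getElem_mem hk
    exact (PySem.List.mem_sorted _ _ _ _).mp hmem
  · rcases runMax_cases beans (d0 :: ds) 0 (keepf beans d0 0) with hc | ⟨P, v, S, hsp, heq⟩
    · rw [hc]
      have h0 := split_prefix_sum beans [] d0 ds hD
      simp only [List.map_nil, List.sum_nil] at h0
      rw [show (0:Int) = ((beans.countP (fun u => decide (u < d0)) : Int)) from h0, keepf_eq_gB]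
      apply gB_le_MA
      have hd0 : d0 ∈ d0 :: ds := List.mem_cons_self
      rw [← hD] at hd0
      exact (PySem.Set.mem_ofList _ _).mp ((PySem.List.mem_sorted _ _ _ _).mp hd0)
    · rw [heq, zero_add, split_prefix_sum beans P v S (hD.trans hsp), keepf_eq_gB]
      apply gB_le_MA
      have hvmem : v ∈ P ++ v :: S := List.mem_append_right _ (List.mem_cons_self)
      rw [← hsp, ← hD] at hvmem
      exact (PySem.Set.mem_ofList _ _).mp ((PySem.List.mem_sorted _ _ _ _).mp hvmem)
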